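-- pv_equiv track=rewrite | github.com/pagniol/mcFF | src/bin/test/process_dotb.py | extract_mcannotate_bps
-- ===== SOURCE A (Python) =====
-- def extract_mcannotate_bps(mc_annotate_output):
--     """
--     Extrait les paires de bases de la sortie MC-Annotate.
--
--     :param mc_annotate_file: Chemin du fichier contenant le résultat de MC-Annotate
--     :return: Liste de tuples représentant les paires de bases
--     """
--     base_pairs = []
--
--     # Chercher la section 'Base-pairs'
--     inside_base_pairs = False
--     for line in mc_annotate_output:
--         line = line.strip()
--         if line.startswith("Base-pairs"):
--             inside_base_pairs = True
--
--         if inside_base_pairs: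
--             # Une ligne vide signifie la fin de cette section
--             if not line:
--                 continue
--             # Extraire les paires de bases
--             # Exemple de format de ligne: A1-A72 : G-C Ww/Ww pairing antiparallel cis XIX
--             if ':' in line:
--                 parts = line.split(':')
--                 pair_info = parts[0].strip()  # A1-A72
--                 details = parts[1].strip()   # G-C Ww/Ww pairing antiparallel cis XIX
--                 base_pairs.append((pair_info, details))
--
--     index_pairs = []
--     for pair, details in base_pairs:
--         # Séparer les deux parties de la paire, ex: 'A1-A72'
--         nucleotide1, nucleotide2 = pair.split('-')
--         # Extraire les indices numériques des nucléotides
--         index1 = int(nucleotide1[1:])  # Supprime le 'A' pour obtenir le numéro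
--         index2 = int(nucleotide2[1:])  # Supprime le 'A' pour obtenir le numéro
--         # Ajouter le couple (i, j) à la liste
--         index_pairs.append([index1, index2, details])
--
--     #trier les paires
--     ignore_terms = [
--         "O2P/Bh adjacent_5p pairing",
--         "Bs/O2' adjacent_5p pairing",
--         "O2'/Ww O2'/Bs inward pairing",
--         "O2'/Ww pairing",
--         "O2'/Hh adjacent_5p pairing",
--         "O2'/Bh pairing",
--         "O2P/Bh pairing",
--         'Ww/O2P pairing',
--         "O2'/Hh Hh/O2P Ww/O2P pairing",
--         "Hh/Hh Bh/O2P pairing parallel",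
--         "O2'/Bs inward pairing",
--         "Ww/Hh pairing antiparallel",
--         "Ww/Ww pairing parallel",
--     ]
--
--     pairs = list()
--     mc_annotate_ignore_pairs = list()
--     for i, j, details in index_pairs:
--         # Vérifier si la description contient un terme à ignorer
--         if any(term in details for term in ignore_terms):
--             mc_annotate_ignore_pairs.append((i,j))
--         else:
--             pairs.append((i,j))
--
--     return pairs, mc_annotate_ignore_pairs
-- ===== SOURCE B (Python) =====
-- def extract_mcannotate_bps(mc_annotate_output):
--     """Single-pass re-implementation: one loop over the lines classifies each
--     base-pair line directly, with no intermediate base_pairs/index_pairs lists."""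
--     ignore_terms = [
--         "O2P/Bh adjacent_5p pairing",
--         "Bs/O2' adjacent_5p pairing",
--         "O2'/Ww O2'/Bs inward pairing",
--         "O2'/Ww pairing",
--         "O2'/Hh adjacent_5p pairing",
--         "O2'/Bh pairing",
--         "O2P/Bh pairing",
--         'Ww/O2P pairing',
--         "O2'/Hh Hh/O2P Ww/O2P pairing",
--         "Hh/Hh Bh/O2P pairing parallel",
--         "O2'/Bs inward pairing",
--         "Ww/Hh pairing antiparallel",
--         "Ww/Ww pairing parallel",
--     ]
--     pairs = []
--     mc_annotate_ignore_pairs = []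
--     inside = False
--     for raw in mc_annotate_output:
--         line = raw.strip()
--         if line.startswith("Base-pairs"):
--             inside = True
--         if not inside or ':' not in line:
--             continue
--         parts = line.split(':')
--         pair_info = parts[0].strip()
--         details = parts[1].strip()
--         nucleotide1, nucleotide2 = pair_info.split('-')
--         i = int(nucleotide1[1:])
--         j = int(nucleotide2[1:])
--         if any(term in details for term in ignore_terms):
--             mc_annotate_ignore_pairs.append((i, j))
--         else:
--             pairs.append((i, j))
--     return pairs, mc_annotate_ignore_pairs
-- ===== Notes on version B (the rewrite author's own statement) =====
-- stated objective: simpler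
-- what changed: B replaces A's three sequential passes (collect (pair_info, details) strings, then map them to [i, j, details] triples, then partition into kept/ignored) by a single pass over the lines that parses each base-pair line and appends (i,j) directly to the right output list, dropping the intermediate base_pairs and index_pairs lists.
import Mathlib
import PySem

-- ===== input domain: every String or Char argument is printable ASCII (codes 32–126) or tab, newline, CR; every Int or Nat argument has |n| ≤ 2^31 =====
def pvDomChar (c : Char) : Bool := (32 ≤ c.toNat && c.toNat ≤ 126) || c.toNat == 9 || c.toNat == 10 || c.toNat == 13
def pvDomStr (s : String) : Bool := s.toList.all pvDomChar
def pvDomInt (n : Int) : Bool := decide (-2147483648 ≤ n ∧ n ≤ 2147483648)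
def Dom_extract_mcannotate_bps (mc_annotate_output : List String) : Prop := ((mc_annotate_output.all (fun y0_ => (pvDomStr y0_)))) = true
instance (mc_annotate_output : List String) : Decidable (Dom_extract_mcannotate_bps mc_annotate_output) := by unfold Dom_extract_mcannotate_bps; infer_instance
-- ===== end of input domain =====

-- B fuses A's three passes (collect, index, partition) into one pass that classifies
-- each base-pair line directly; same return value, no intermediate lists (objective: simpler).

-- ===== PORT A =====
def pvIgnoreTerms : List String := [
  "O2P/Bh adjacent_5p pairing",
  "Bs/O2' adjacent_5p pairing",
  "O2'/Ww O2'/Bs inward pairing",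
  "O2'/Ww pairing",
  "O2'/Hh adjacent_5p pairing",
  "O2'/Bh pairing",
  "O2P/Bh pairing",
  "Ww/O2P pairing",
  "O2'/Hh Hh/O2P Ww/O2P pairing",
  "Hh/Hh Bh/O2P pairing parallel",
  "O2'/Bs inward pairing",
  "Ww/Hh pairing antiparallel",
  "Ww/Ww pairing parallel"]

-- first loop of A: collect (pair_info, details) pairs, threading the inside_base_pairs flag
def pvStep1 (st : List (String × String) × Bool) (line0 : String) : List (String × String) × Bool :=
  let line := PySem.Str.strip line0
  let inside := st.2 || PySem.Str.startswith line "Base-pairs"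
  if inside then
    if line = "" then (st.1, inside)           -- 'if not line: continue'
    else if PySem.Str.isIn ":" line then
      let parts := (PySem.Str.split? line ":").getD []  -- line.split(':'); ':' in line ⇒ ≥ 2 parts, so
      (st.1 ++ [(PySem.Str.strip (parts.getD 0 ""), PySem.Str.strip (parts.getD 1 ""))], inside)
      -- parts[0]/parts[1] cannot raise here; getD defaults are never read
    else (st.1, inside)
  else (st.1, inside)

-- body of A's second loop: 'A1-A72' → (1, 72, details). Python raises (ValueError) when
-- pair.split('-') has ≠ 2 parts or int() fails; those inputs are outside Pre_, so the
-- getD 0 defaults are never read on admitted inputs.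
def pvParse (pd : String × String) : Int × Int × String :=
  let ns := (PySem.Str.split? pd.1 "-").getD []
  let i := (PySem.Int.ofStr? (PySem.Str.slice (ns.getD 0 "") (some 1) none)).getD 0
  let j := (PySem.Int.ofStr? (PySem.Str.slice (ns.getD 1 "") (some 1) none)).getD 0
  (i, j, pd.2)

-- body of A's third loop: classify one (i, j, details) triple
def pvStep3 (st : List (Int × Int) × List (Int × Int)) (t : Int × Int × String) :
    List (Int × Int) × List (Int × Int) :=
  if pvIgnoreTerms.any (fun term => PySem.Str.isIn term t.2.2) then
    (st.1, st.2 ++ [(t.1, t.2.1)])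
  else
    (st.1 ++ [(t.1, t.2.1)], st.2)

def extract_mcannotate_bps (mc_annotate_output : List String) :
    (List (Int × Int)) × (List (Int × Int)) :=
  let basePairs := (mc_annotate_output.foldl pvStep1 ([], false)).1
  let indexPairs := basePairs.foldl (fun acc pd => acc ++ [pvParse pd]) []
  indexPairs.foldl pvStep3 ([], [])

-- ===== PORT B =====
-- single pass: parse and classify each base-pair line immediately
def pvStepB (st : (List (Int × Int) × List (Int × Int)) × Bool) (raw : String) :
    (List (Int × Int) × List (Int × Int)) × Bool :=
  let line := PySem.Str.strip raw
  let inside := st.2 || PySem.Str.startswith line "Base-pairs"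
  if inside && PySem.Str.isIn ":" line then
    let parts := (PySem.Str.split? line ":").getD []
    let pairInfo := PySem.Str.strip (parts.getD 0 "")
    let details := PySem.Str.strip (parts.getD 1 "")
    let ns := (PySem.Str.split? pairInfo "-").getD []
    let i := (PySem.Int.ofStr? (PySem.Str.slice (ns.getD 0 "") (some 1) none)).getD 0
    let j := (PySem.Int.ofStr? (PySem.Str.slice (ns.getD 1 "") (some 1) none)).getD 0
    if pvIgnoreTerms.any (fun term => PySem.Str.isIn term details) then
      ((st.1.1, st.1.2 ++ [(i, j)]), inside)
    else
      ((st.1.1 ++ [(i, j)], st.1.2), inside)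
  else (st.1, inside)

def extract_mcannotate_bps_alt (mc_annotate_output : List String) :
    (List (Int × Int)) × (List (Int × Int)) :=
  (mc_annotate_output.foldl pvStepB (([], []), false)).1

-- ===== PRECONDITION & SPEC =====
-- one processed line is well-formed: no ':' after strip, or its pair_info part has exactly
-- one '-' and both nucleotide tails parse as ints (else Python's unpack / int() raises)
def pvLineOk (l : String) : Bool :=
  let t := PySem.Str.strip l
  !(PySem.Str.isIn ":" t) ||
    (let parts := (PySem.Str.split? t ":").getD []
     let ns := (PySem.Str.split? (PySem.Str.strip (parts.getD 0 "")) "-").getD []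
     ns.length == 2 &&
     (PySem.Int.ofStr? (PySem.Str.slice (ns.getD 0 "") (some 1) none)).isSome &&
     (PySem.Int.ofStr? (PySem.Str.slice (ns.getD 1 "") (some 1) none)).isSome)

-- Pre_ excludes exactly the inputs where Python A raises ValueError: some line at or after
-- the first 'Base-pairs' line contains ':' but is not of the well-formed 'X<i>-Y<j> : …' shape.
def Pre_extract_mcannotate_bps (mc_annotate_output : List String) : Prop :=
  ∀ j < mc_annotate_output.length,
    (∃ i ≤ j, PySem.Str.startswith (PySem.Str.strip (mc_annotate_output.getD i "")) "Base-pairs" = true) →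
    pvLineOk (mc_annotate_output.getD j "") = true
instance (mc_annotate_output : List String) : Decidable (Pre_extract_mcannotate_bps mc_annotate_output) := by
  unfold Pre_extract_mcannotate_bps; infer_instance

def pvWitness_extract_mcannotate_bps : List String :=
  ["Residue conformations", "Base-pairs ------------",
   "A1-A72 : G-C Ww/Ww pairing antiparallel cis XIX",
   "A2-A3 : Ww/Ww pairing parallel"]

def Spec_extract_mcannotate_bps (mc_annotate_output : List String) (out : (List (Int × Int)) × (List (Int × Int))) : Prop := out = extract_mcannotate_bps_alt mc_annotate_output
instance (mc_annotate_output : List String) (out : (List (Int × Int)) × (List (Int × Int))) : Decidable (Spec_extract_mcannotate_bps mc_annotate_output out) := by unfold Spec_extract_mcannotate_bps; infer_instance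

-- ===== CLAIM (what is proved, stated in full; the proofs are below) =====
def Claim_equal_extract_mcannotate_bps : Prop := ∀ (mc_annotate_output : List String), Dom_extract_mcannotate_bps mc_annotate_output → Pre_extract_mcannotate_bps mc_annotate_output → Spec_extract_mcannotate_bps mc_annotate_output (extract_mcannotate_bps mc_annotate_output)

-- ===== LEMMAS AND PROOFS =====

-- the fused per-base-pair step: A's second-loop body followed by its third-loop body
def pvClassify (st : List (Int × Int) × List (Int × Int)) (pd : String × String) :
    List (Int × Int) × List (Int × Int) :=
  pvStep3 st (pvParse pd)

theorem pvA_char (mc : List String) :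
    extract_mcannotate_bps mc =
      ((mc.foldl pvStep1 ([], false)).1).foldl pvClassify ([], []) := by
  show (((mc.foldl pvStep1 ([], false)).1.foldl
      (fun acc pd => acc ++ [pvParse pd]) []).foldl pvStep3 ([], [])) = _
  rw [PySem.List.foldl_append_singleton_eq_map, List.nil_append, List.foldl_map]
  rfl

theorem pvStepB_char (l : String) (s : List (Int × Int) × List (Int × Int)) (flag : Bool) :
    pvStepB (s, flag) l =
      ((if (flag || PySem.Str.startswith (PySem.Str.strip l) "Base-pairs")
            && PySem.Str.isIn ":" (PySem.Str.strip l) then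
          pvClassify s (PySem.Str.strip ((((PySem.Str.split? (PySem.Str.strip l) ":").getD []).getD 0 "")),
                        PySem.Str.strip ((((PySem.Str.split? (PySem.Str.strip l) ":").getD []).getD 1 "")))
        else s),
       flag || PySem.Str.startswith (PySem.Str.strip l) "Base-pairs") := by
  unfold pvStepB pvClassify pvStep3 pvParse
  split_ifs <;> simp_all

theorem pvStep1_char (l : String) (bps : List (String × String)) (flag : Bool) :
    pvStep1 (bps, flag) l =
      ((if (flag || PySem.Str.startswith (PySem.Str.strip l) "Base-pairs")
            && PySem.Str.isIn ":" (PySem.Str.strip l) then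
          bps ++ [(PySem.Str.strip ((((PySem.Str.split? (PySem.Str.strip l) ":").getD []).getD 0 "")),
                   PySem.Str.strip ((((PySem.Str.split? (PySem.Str.strip l) ":").getD []).getD 1 "")))]
        else bps),
       flag || PySem.Str.startswith (PySem.Str.strip l) "Base-pairs") := by
  simp only [pvStep1]
  by_cases hemp : PySem.Str.strip l = ""
  · simp [hemp]
    intro _
    decide
  · split_ifs <;> simp_all

theorem pvMain (mc : List String) :
    ∀ (flag : Bool) (bps : List (String × String)) (s : List (Int × Int) × List (Int × Int)),
    (mc.foldl pvStepB (bps.foldl pvClassify s, flag)).1 =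
      ((mc.foldl pvStep1 (bps, flag)).1).foldl pvClassify s := by
  induction mc with
  | nil => intro flag bps s; rfl
  | cons l rest ih =>
    intro flag bps s
    simp only [List.foldl_cons]
    rw [pvStepB_char, pvStep1_char]
    by_cases h : ((flag || PySem.Str.startswith (PySem.Str.strip l) "Base-pairs")
        && PySem.Str.isIn ":" (PySem.Str.strip l)) = true
    · rw [if_pos h, if_pos h, show ∀ (pd : String × String), pvClassify (List.foldl pvClassify s bps) pd =
          List.foldl pvClassify s (bps ++ [pd]) from fun pd => by simp [List.foldl_append]]
      exact ih _ _ _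
    · rw [if_neg h, if_neg h]
      exact ih _ _ _

-- ===== VERDICT (by name: the statement is the Claim_ definition above) =====
theorem extract_mcannotate_bps_spec : Claim_equal_extract_mcannotate_bps := by
  intro mc _ _
  unfold Spec_extract_mcannotate_bps
  rw [pvA_char]
  have := pvMain mc false [] ([], [])
  simpa [extract_mcannotate_bps_alt] using this.symm
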